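-- pv_equiv track=rewrite | github.com/MuhammadAhmadBrainstormerTech/Tod-Assistant | main.py | normalize_query
-- ===== SOURCE A (Python) =====
-- QUERY_SYNONYMS = {
--     "student": ["kid", "child", "new student", "pupil"],
--     "add": ["register", "enroll", "create"],
--     "remove": ["delete", "erase", "unregister"],
--     "access": ["view","go to"],
--     "update": ["edit", "modify", "change"],
--     "password": ["credentials", "passcode", "login key"],
--     "staff": ["instructor", "educator", "employee","worker"],
--     # Dashboard-related
--     "dashboard": ["panel", "control center", "admin panel", "overview", "interface"],
--     "company dashboard": ["business panel", "corporate overview", "organization dashboard"],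
--     # Attendance-related
--     "attendance": ["presence", "check-in", "roll call", "participation", "time tracking"],
--     # Branch-related
--     "branch": ["division", "unit", "location", "office", "subdivision"],
--     # Classroom-related
--     "classroom": ["lecture hall", "learning space", "study room", "training room"],
--     # Promotion-related
--     "promotion": ["advancement", "upgrade", "progression", "elevation", "boost"],
--     # Admission Query-related
--     "admission query": ["enrollment request", "application inquiry", "registration query", "student admission"]
-- }
--
-- def normalize_query(query):
--     """Replaces query words with their most common synonyms for better search accuracy."""
--     words = query.lower().split()
--     normalized_words = []
--
--     for word in words:
--         found_synonym = False
--         for key, synonyms in QUERY_SYNONYMS.items():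
--             if word in synonyms or word == key:
--                 normalized_words.append(key)  # Use the standard word
--                 found_synonym = True
--                 break
--
--         if not found_synonym:
--             normalized_words.append(word)  # Keep original if no synonym found
--
--     return " ".join(normalized_words)
-- ===== SOURCE B (Python) =====
-- # Flat canonical-form table: each alias (key or synonym) maps directly to its
-- # canonical key, so normalization is one dict lookup per word instead of a
-- # scan over the grouped synonym table.
-- _CANON = {
--     "student": "student", "kid": "student", "child": "student", "new student": "student", "pupil": "student",
--     "add": "add", "register": "add", "enroll": "add", "create": "add",
--     "remove": "remove", "delete": "remove", "erase": "remove", "unregister": "remove",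
--     "access": "access", "view": "access", "go to": "access",
--     "update": "update", "edit": "update", "modify": "update", "change": "update",
--     "password": "password", "credentials": "password", "passcode": "password", "login key": "password",
--     "staff": "staff", "instructor": "staff", "educator": "staff", "employee": "staff", "worker": "staff",
--     "dashboard": "dashboard", "panel": "dashboard", "control center": "dashboard", "admin panel": "dashboard", "overview": "dashboard", "interface": "dashboard",
--     "company dashboard": "company dashboard", "business panel": "company dashboard", "corporate overview": "company dashboard", "organization dashboard": "company dashboard",
--     "attendance": "attendance", "presence": "attendance", "check-in": "attendance", "roll call": "attendance", "participation": "attendance", "time tracking": "attendance",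
--     "branch": "branch", "division": "branch", "unit": "branch", "location": "branch", "office": "branch", "subdivision": "branch",
--     "classroom": "classroom", "lecture hall": "classroom", "learning space": "classroom", "study room": "classroom", "training room": "classroom",
--     "promotion": "promotion", "advancement": "promotion", "upgrade": "promotion", "progression": "promotion", "elevation": "promotion", "boost": "promotion",
--     "admission query": "admission query", "enrollment request": "admission query", "application inquiry": "admission query", "registration query": "admission query", "student admission": "admission query",
-- }
--
-- def normalize_query(query):
--     """Replaces query words with their most common synonyms for better search accuracy."""
--     return " ".join(_CANON.get(w, w) for w in query.lower().split())
-- ===== Notes on version B (the rewrite author's own statement) =====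
-- stated objective: idiomatic
-- what changed: B replaces the grouped synonym table and its per-word nested scan by a flat alias->canonical dict written out once, so each word is normalized by a single dict lookup with get(w, w).
import Mathlib
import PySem

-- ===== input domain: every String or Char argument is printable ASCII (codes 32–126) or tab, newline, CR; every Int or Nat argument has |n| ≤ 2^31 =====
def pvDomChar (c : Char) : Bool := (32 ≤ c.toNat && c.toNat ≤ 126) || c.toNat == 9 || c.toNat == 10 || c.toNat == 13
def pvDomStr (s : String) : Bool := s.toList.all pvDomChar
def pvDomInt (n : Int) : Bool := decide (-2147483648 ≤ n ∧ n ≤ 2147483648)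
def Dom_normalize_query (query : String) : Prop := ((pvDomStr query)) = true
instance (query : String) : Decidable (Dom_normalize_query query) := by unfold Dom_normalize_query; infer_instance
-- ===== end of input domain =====

-- B replaces the grouped table + per-word nested scan by a flat alias→canonical
-- dict (one lookup per word); equivalence is proved for all inputs.

-- ===== PORT A =====
-- QUERY_SYNONYMS as an ordered association list (Python dict iteration order)
def pvSynTable : List (String × List String) :=
  [("student", ["kid", "child", "new student", "pupil"]),
   ("add", ["register", "enroll", "create"]),
   ("remove", ["delete", "erase", "unregister"]),
   ("access", ["view", "go to"]),
   ("update", ["edit", "modify", "change"]),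
   ("password", ["credentials", "passcode", "login key"]),
   ("staff", ["instructor", "educator", "employee", "worker"]),
   ("dashboard", ["panel", "control center", "admin panel", "overview", "interface"]),
   ("company dashboard", ["business panel", "corporate overview", "organization dashboard"]),
   ("attendance", ["presence", "check-in", "roll call", "participation", "time tracking"]),
   ("branch", ["division", "unit", "location", "office", "subdivision"]),
   ("classroom", ["lecture hall", "learning space", "study room", "training room"]),
   ("promotion", ["advancement", "upgrade", "progression", "elevation", "boost"]),
   ("admission query", ["enrollment request", "application inquiry", "registration query", "student admission"])]

-- inner 'for key, synonyms in QUERY_SYNONYMS.items(): … break' loop of A: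
-- first key whose entry matches the word, else the word itself
def pvScanA (tbl : List (String × List String)) (word : String) : String :=
  match tbl with
  | [] => word
  | (key, synonyms) :: rest =>
      if synonyms.contains word || word == key then key else pvScanA rest word

def normalize_query (query : String) : String :=
  let words := PySem.Str.split₀ (PySem.Str.lower query)
  let normalized_words := words.foldl (fun acc word => acc ++ [pvScanA pvSynTable word]) []
  PySem.Str.join " " normalized_words

-- ===== PORT B =====
-- the flat _CANON dict literal of Source B (alias → canonical key, all aliases distinct)
def pvCanon : PySem.Dict String String := PySem.Dict.mk
  [("student", "student"), ("kid", "student"), ("child", "student"), ("new student", "student"), ("pupil", "student"),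
   ("add", "add"), ("register", "add"), ("enroll", "add"), ("create", "add"),
   ("remove", "remove"), ("delete", "remove"), ("erase", "remove"), ("unregister", "remove"),
   ("access", "access"), ("view", "access"), ("go to", "access"),
   ("update", "update"), ("edit", "update"), ("modify", "update"), ("change", "update"),
   ("password", "password"), ("credentials", "password"), ("passcode", "password"), ("login key", "password"),
   ("staff", "staff"), ("instructor", "staff"), ("educator", "staff"), ("employee", "staff"), ("worker", "staff"),
   ("dashboard", "dashboard"), ("panel", "dashboard"), ("control center", "dashboard"), ("admin panel", "dashboard"), ("overview", "dashboard"), ("interface", "dashboard"),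
   ("company dashboard", "company dashboard"), ("business panel", "company dashboard"), ("corporate overview", "company dashboard"), ("organization dashboard", "company dashboard"),
   ("attendance", "attendance"), ("presence", "attendance"), ("check-in", "attendance"), ("roll call", "attendance"), ("participation", "attendance"), ("time tracking", "attendance"),
   ("branch", "branch"), ("division", "branch"), ("unit", "branch"), ("location", "branch"), ("office", "branch"), ("subdivision", "branch"),
   ("classroom", "classroom"), ("lecture hall", "classroom"), ("learning space", "classroom"), ("study room", "classroom"), ("training room", "classroom"),
   ("promotion", "promotion"), ("advancement", "promotion"), ("upgrade", "promotion"), ("progression", "promotion"), ("elevation", "promotion"), ("boost", "promotion"),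
   ("admission query", "admission query"), ("enrollment request", "admission query"), ("application inquiry", "admission query"), ("registration query", "admission query"), ("student admission", "admission query")]

def normalize_query_alt (query : String) : String :=
  PySem.Str.join " "
    ((PySem.Str.split₀ (PySem.Str.lower query)).map (fun w => pvCanon.getD w w))

-- ===== PRECONDITION & SPEC =====
def Spec_normalize_query (query : String) (out : String) : Prop := out = normalize_query_alt query
instance (query : String) (out : String) : Decidable (Spec_normalize_query query out) := by unfold Spec_normalize_query; infer_instance

-- ===== CLAIM =====
def Claim_equal_normalize_query : Prop := ∀ (query : String), Dom_normalize_query query → Spec_normalize_query query (normalize_query query)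

-- ===== LEMMAS AND PROOFS =====

-- first match in a flat association list
def pvLookup (l : List (String × String)) (w : String) : Option String :=
  match l with
  | [] => none
  | p :: rest => if p.1 == w then some p.2 else pvLookup rest w

theorem pvLookup_append (l₁ l₂ : List (String × String)) (w : String) :
    pvLookup (l₁ ++ l₂) w = (pvLookup l₁ w).or (pvLookup l₂ w) := by
  induction l₁ with
  | nil => rfl
  | cons p rest ih => simp only [List.cons_append, pvLookup]; split_ifs <;> simp [ih]

-- flattening the grouped table into alias→key pairs (entry key first, then synonyms)
def pvFlatten (tbl : List (String × List String)) : List (String × String) :=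
  tbl.flatMap (fun kv => (kv.1, kv.1) :: kv.2.map (fun s => (s, kv.1)))

theorem pvLookup_synMap (k : String) (syns : List String) (w : String) :
    pvLookup (syns.map (fun s => (s, k))) w
      = (if syns.contains w then some k else none) := by
  induction syns with
  | nil => simp [pvLookup]
  | cons s rest ih =>
      simp only [List.map_cons, pvLookup, List.contains_cons]
      by_cases hs : s = w
      · simp [hs]
      · have h1 : (s == w) = false := beq_eq_false_iff_ne.mpr hs
        have h2 : (w == s) = false := beq_eq_false_iff_ne.mpr (Ne.symm hs)
        simp [h1, h2, ih]

-- A's scan over the grouped table = first match in the flattened list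
theorem pvScanA_eq_lookup_flatten (tbl : List (String × List String)) (w : String) :
    pvScanA tbl w = (pvLookup (pvFlatten tbl) w).getD w := by
  induction tbl with
  | nil => rfl
  | cons kv rest ih =>
      obtain ⟨k, syns⟩ := kv
      simp only [pvScanA, pvFlatten, List.flatMap_cons, List.cons_append, pvLookup,
        pvLookup_append, pvLookup_synMap]
      by_cases hk : k = w
      · simp [hk]
      · have hk1 : (k == w) = false := beq_eq_false_iff_ne.mpr hk
        have hk2 : (w == k) = false := beq_eq_false_iff_ne.mpr (Ne.symm hk)
        by_cases hm : w ∈ syns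
        · simp [hk1, hk2, hm]
        · simp [hk1, hk2, hm, ih, pvFlatten]

-- lookup in a literal dict = first match in its items list
theorem pvDict_get?_mk (l : List (String × String)) (w : String) :
    (PySem.Dict.mk l).get? w = pvLookup l w := by
  induction l with
  | nil => rfl
  | cons p rest ih =>
      rw [show (PySem.Dict.mk (p :: rest)) = PySem.Dict.mk ((p.1, p.2) :: rest) from rfl,
          PySem.Dict.get?_mk_cons]
      simp only [pvLookup, ih]

theorem pvCanon_getD (w : String) : pvCanon.getD w w = pvScanA pvSynTable w := by
  rw [PySem.Dict.getD_eq_get?_getD, pvScanA_eq_lookup_flatten, pvCanon, pvDict_get?_mk]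
  rfl

-- ===== VERDICT =====
theorem normalize_query_spec : Claim_equal_normalize_query := by
  intro query _
  unfold Spec_normalize_query normalize_query normalize_query_alt
  simp only [PySem.List.foldl_append_singleton_eq_map, pvCanon_getD, List.nil_append]
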